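-- pv_equiv track=rewrite | github.com/mammothb/lc-solutions | array_strings/1347_minimum_number_of_steps_to_make_two_strings_anagram/solution.py | min_steps_builtin_counter
-- ===== SOURCE A (Python) =====
-- from collections import Counter
--
-- def min_steps_builtin_counter(s: str, t: str) -> int:
--     counter_s = Counter(s)
--     counter_t = Counter(t)
--     result = 0
--     for c_s, cnt_s in counter_s.items():
--         if c_s not in counter_t:
--             result += cnt_s
--         elif cnt_s > (cnt_t := counter_t[c_s]):
--             result += cnt_s - cnt_t
--     return result
-- ===== SOURCE B (Python) =====
-- def min_steps_builtin_counter(s: str, t: str) -> int: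
--     pool = list(t)
--     steps = 0
--     for c in s:
--         if c in pool:
--             pool.remove(c)
--         else:
--             steps += 1
--     return steps
-- ===== Notes on version B (the rewrite author's own statement) =====
-- stated objective: alternative
-- what changed: Replaces frequency counting entirely with greedy multiset matching: walk s, consuming one matching character from a mutable pool of t's characters, and count the characters of s that find no match; no counter/dict is built.
import Mathlib
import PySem

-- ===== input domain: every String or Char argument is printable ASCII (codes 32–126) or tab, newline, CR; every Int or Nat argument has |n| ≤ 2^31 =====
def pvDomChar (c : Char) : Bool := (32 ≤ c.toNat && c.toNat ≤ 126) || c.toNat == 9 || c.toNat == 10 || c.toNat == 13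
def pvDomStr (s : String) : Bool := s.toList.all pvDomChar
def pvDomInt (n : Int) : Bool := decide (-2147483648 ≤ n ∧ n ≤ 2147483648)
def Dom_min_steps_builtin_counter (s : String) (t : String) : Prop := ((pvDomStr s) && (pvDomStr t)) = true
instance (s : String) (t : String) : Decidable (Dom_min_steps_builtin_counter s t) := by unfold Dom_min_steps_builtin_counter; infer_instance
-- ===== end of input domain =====

-- B replaces frequency counting with greedy multiset matching against a pool of t's characters; objective: alternative.
-- ===== PORT A =====
def min_steps_builtin_counter (s : String) (t : String) : Int :=
  let counter_s := PySem.Dict.counter s.toList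
  let counter_t := PySem.Dict.counter t.toList
  counter_s.items.foldl
    (fun result p =>
      if counter_t.contains p.1 = false then result + p.2
      else if p.2 > counter_t.getD p.1 0 then result + (p.2 - counter_t.getD p.1 0)
      else result) 0

-- ===== PORT B =====
-- pool.remove(c) is reached only under 'c in pool', so remove?'s none case is unreachable; getD is exact there.
def min_steps_builtin_counter_alt (s : String) (t : String) : Int :=
  (s.toList.foldl
    (fun (st : List Char × Int) c =>
      if st.1.contains c then ((PySem.List.remove? st.1 c).getD st.1, st.2)
      else (st.1, st.2 + 1))
    (t.toList, 0)).2

-- ===== PRECONDITION & SPEC =====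
def Spec_min_steps_builtin_counter (s : String) (t : String) (out : Int) : Prop := out = min_steps_builtin_counter_alt s t
instance (s : String) (t : String) (out : Int) : Decidable (Spec_min_steps_builtin_counter s t out) := by unfold Spec_min_steps_builtin_counter; infer_instance

-- ===== CLAIM (what is proved, stated in full; the proofs are below) =====
def Claim_equal_min_steps_builtin_counter : Prop := ∀ (s : String) (t : String), Dom_min_steps_builtin_counter s t → Spec_min_steps_builtin_counter s t (min_steps_builtin_counter s t)

-- ===== LEMMAS AND PROOFS =====
-- A's loop over the counter items is a sum of surplus values.
lemma foldl_surplus (ct : PySem.Dict Char Int) (ps : List (Char × Int)) (r : Int) :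
    ps.foldl (fun result p =>
        if ct.contains p.1 = false then result + p.2
        else if p.2 > ct.getD p.1 0 then result + (p.2 - ct.getD p.1 0)
        else result) r
    = r + (ps.map (fun p =>
        if ct.contains p.1 = false then p.2
        else if p.2 > ct.getD p.1 0 then p.2 - ct.getD p.1 0
        else 0)).sum := by
  induction ps generalizing r with
  | nil => simp
  | cons p ps ih =>
      simp only [List.foldl_cons, List.map_cons, List.sum_cons, ih]
      split_ifs <;> ring

-- B's loop invariant: the step count grows by the multiset difference of the remaining input and pool.
lemma loop_snd (xs : List Char) (pool : List Char) (st : Int) :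
    (xs.foldl
      (fun (st : List Char × Int) c =>
        if st.1.contains c then ((PySem.List.remove? st.1 c).getD st.1, st.2)
        else (st.1, st.2 + 1))
      (pool, st)).2
    = st + (((xs : Multiset Char) - (pool : Multiset Char)).card : Int) := by
  induction xs generalizing pool st with
  | nil => simp
  | cons c xs ih =>
      simp only [List.foldl_cons]
      by_cases h : c ∈ pool
      · have hc : pool.contains c = true := List.contains_iff_mem.mpr h
        rw [if_pos hc, PySem.List.remove?_eq_some_erase pool c h, Option.getD_some, ih]
        have hm : ((c :: xs : List Char) : Multiset Char) - (pool : Multiset Char)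
            = (xs : Multiset Char) - ((pool.erase c : List Char) : Multiset Char) := by
          have hp : ((pool : Multiset Char)) = c ::ₘ ((pool.erase c : List Char) : Multiset Char) := by
            rw [← Multiset.coe_erase, Multiset.cons_erase ((Multiset.mem_coe).mpr h)]
          rw [← Multiset.cons_coe, hp, Multiset.sub_cons, Multiset.erase_cons_head]
        rw [hm]
      · rw [if_neg (by simp [h]), ih]
        have h0 : pool.count c = 0 := List.count_eq_zero.mpr h
        have hm : ((c :: xs : List Char) : Multiset Char) - (pool : Multiset Char)
            = c ::ₘ ((xs : Multiset Char) - (pool : Multiset Char)) := by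
          ext a
          simp only [Multiset.coe_sub, Multiset.cons_coe, Multiset.coe_count,
            List.count_diff, List.count_cons]
          by_cases ha : a = c
          · subst ha; simp [h0]
          · have ha' : ¬ c = a := fun hh => ha hh.symm
            simp [ha']
        rw [hm, Multiset.card_cons]
        push_cast
        ring

-- Per-character value of A's branch equals the truncated count difference.
lemma branch_value (ls lt : List Char) (k : Char) :
    (if (PySem.Dict.counter lt).contains k = false then (ls.count k : Int)
     else if (ls.count k : Int) > (PySem.Dict.counter lt).getD k 0
       then (ls.count k : Int) - (PySem.Dict.counter lt).getD k 0
       else 0)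
    = ((ls.count k - lt.count k : ℕ) : ℤ) := by
  rw [PySem.Dict.getD_counter, PySem.Dict.contains_counter]
  by_cases h : k ∈ lt
  · have hc : lt.contains k = true := List.contains_iff_mem.mpr h
    simp only [hc]
    split_ifs with h1 h2 h2 <;> push_cast at * <;> omega
  · have hc : lt.contains k = false := by simp [h]
    have h0 : lt.count k = 0 := List.count_eq_zero.mpr h
    rw [if_pos hc, h0, Nat.sub_zero]

-- ===== VERDICT (by name: the statement is the Claim_ definition above) =====
theorem min_steps_builtin_counter_spec : Claim_equal_min_steps_builtin_counter := by
  intro s t _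
  unfold Spec_min_steps_builtin_counter min_steps_builtin_counter min_steps_builtin_counter_alt
  set ls := s.toList with hls
  set lt := t.toList with hlt
  simp only [loop_snd, zero_add, PySem.Dict.items_counter, foldl_surplus, List.map_map]
  -- both sides: sum over distinct chars of s of the truncated surplus
  have hcong :
      ((PySem.Set.ofList ls).map
        ((fun p : Char × Int =>
            if (PySem.Dict.counter lt).contains p.1 = false then p.2
            else if p.2 > (PySem.Dict.counter lt).getD p.1 0 then p.2 - (PySem.Dict.counter lt).getD p.1 0
            else 0) ∘ fun k => (k, (ls.count k : Int)))).sum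
      = ((PySem.Set.ofList ls).map (fun k => ((ls.count k - lt.count k : ℕ) : ℤ))).sum := by
    exact congrArg List.sum (List.map_congr_left (fun k _ => branch_value ls lt k))
  rw [hcong]
  -- turn the list sum into a Finset sum over ls.toFinset
  have hnd : (PySem.Set.ofList ls).Nodup := PySem.Set.nodup_ofList ls
  have hfin : (PySem.Set.ofList ls).toFinset = ls.toFinset := by
    ext a; simp [PySem.Set.mem_ofList]
  have hsum :
      ((PySem.Set.ofList ls).map (fun k => ((ls.count k - lt.count k : ℕ) : ℤ))).sum
      = ∑ k ∈ ls.toFinset, ((ls.count k - lt.count k : ℕ) : ℤ) := by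
    rw [← hfin, List.sum_toFinset _ hnd]
  rw [hsum]
  -- the Finset sum is the card of the multiset difference
  have hcard : (((ls : Multiset Char) - (lt : Multiset Char)).card : Int)
      = ∑ k ∈ ls.toFinset, ((ls.count k - lt.count k : ℕ) : ℤ) := by
    have h1 : ((ls : Multiset Char) - (lt : Multiset Char)).card
        = ∑ k ∈ ls.toFinset, (ls.count k - lt.count k) := by
      rw [← Multiset.toFinset_sum_count_eq ((ls : Multiset Char) - (lt : Multiset Char))]
      refine (Finset.sum_subset ?_ ?_).trans
        (Finset.sum_congr rfl (fun k _ => by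
          simp [Multiset.coe_count, List.count_diff]))
      · intro k hk
        rw [Multiset.mem_toFinset, Multiset.coe_sub, Multiset.mem_coe] at hk
        rw [List.mem_toFinset]
        exact (List.diff_sublist ls lt).subset hk
      · intro k _ hk
        rw [Multiset.mem_toFinset, Multiset.coe_sub, Multiset.mem_coe] at hk
        rw [Multiset.coe_sub, Multiset.coe_count]
        exact List.count_eq_zero.mpr hk
    rw [h1]
    push_cast
    rfl
  rw [← hcard]
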